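-- pv_equiv track=rewrite | github.com/Ottitsch/leetcode | python/Edabit.py | climb
-- ===== SOURCE A (Python) =====
-- def climb(stamina, obstacles):
--     count = 0
--     for i in (a - b for a, b in zip(obstacles, obstacles[1:])):
--         mod = (i < 0) + 1
--         stamina -= -(-abs(i)//1) * mod
--         if stamina < 0: return count
--         count += 1
--     return count
-- ===== SOURCE B (Python) =====
-- def climb(stamina, obstacles):
--     prefixes = []
--     total = 0
--     for a, b in zip(obstacles, obstacles[1:]):
--         total += abs(a - b) * (2 if a < b else 1)
--         prefixes.append(total)
--     lo, hi = 0, len(prefixes)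
--     while lo < hi:
--         mid = (lo + hi) // 2
--         if stamina < prefixes[mid]:
--             hi = mid
--         else:
--             lo = mid + 1
--     return lo
-- ===== Notes on version B (the rewrite author's own statement) =====
-- stated objective: alternative
-- what changed: B replaces A's incremental stamina-decrementing scan with early return by building the full per-step cost prefix-sum table and locating the answer with a hand-written bisect_right binary search over the (non-decreasing) table.
import Mathlib
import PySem

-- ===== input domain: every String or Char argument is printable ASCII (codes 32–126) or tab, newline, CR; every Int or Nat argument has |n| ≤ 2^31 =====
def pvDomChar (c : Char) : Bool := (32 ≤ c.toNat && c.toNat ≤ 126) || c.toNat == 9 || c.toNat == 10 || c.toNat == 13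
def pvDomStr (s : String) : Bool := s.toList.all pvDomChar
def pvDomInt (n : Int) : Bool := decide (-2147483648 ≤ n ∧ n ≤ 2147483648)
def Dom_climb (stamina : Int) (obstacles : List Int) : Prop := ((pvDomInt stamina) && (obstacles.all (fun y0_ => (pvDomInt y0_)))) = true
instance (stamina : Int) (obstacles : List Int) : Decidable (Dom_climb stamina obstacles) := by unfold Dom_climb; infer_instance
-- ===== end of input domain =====

-- B builds the per-step-cost prefix-sum table and binary-searches it (hand-written bisect_right)
-- instead of A's early-exit stamina-decrementing scan; alternative decomposition, same O(n) cost.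

-- ===== PORT A =====
-- the generator loop of A over zip(obstacles, obstacles[1:]); carries (stamina, count)
def climbGoA (stamina count : Int) : List (Int × Int) → Int
  | [] => count
  | (a, b) :: rest =>
    let i := a - b
    let md : Int := (if i < 0 then 1 else 0) + 1        -- (i < 0) + 1
    let stamina' := stamina - (-(PySem.Int.floordiv (-(|i|)) 1)) * md  -- -(-abs(i)//1) * mod
    if stamina' < 0 then count
    else climbGoA stamina' (count + 1) rest

def climb (stamina : Int) (obstacles : List Int) : Int :=
  climbGoA stamina 0 (obstacles.zip obstacles.tail)     -- obstacles[1:] = tail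

-- ===== PORT B =====
-- the prefix-building loop of B: appends the running total for each consecutive pair
def climbPref (total : Int) : List (Int × Int) → List Int
  | [] => []
  | (a, b) :: rest =>
    let total' := total + |a - b| * (if a < b then 2 else 1)
    total' :: climbPref total' rest

-- the hand-written bisect_right loop of B
def climbBisect (prefixes : List Int) (x : Int) (lo hi : Nat) : Nat :=
  if _h : lo < hi then
    let mid := (lo + hi) / 2
    if x < prefixes.getD mid 0 then climbBisect prefixes x lo mid
    else climbBisect prefixes x (mid + 1) hi
  else lo
termination_by hi - lo
decreasing_by all_goals omega

def climb_alt (stamina : Int) (obstacles : List Int) : Int :=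
  let prefixes := climbPref 0 (obstacles.zip obstacles.tail)
  (climbBisect prefixes stamina 0 prefixes.length : Int)

-- ===== PRECONDITION & SPEC =====
def Spec_climb (stamina : Int) (obstacles : List Int) (out : Int) : Prop := out = climb_alt stamina obstacles
instance (stamina : Int) (obstacles : List Int) (out : Int) : Decidable (Spec_climb stamina obstacles out) := by unfold Spec_climb; infer_instance

-- ===== CLAIM (what is proved, stated in full; the proofs are below) =====
def Claim_equal_climb : Prop := ∀ (stamina : Int) (obstacles : List Int), Dom_climb stamina obstacles → Spec_climb stamina obstacles (climb stamina obstacles)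

-- ===== LEMMAS AND PROOFS =====

-- shifting the running total shifts the threshold in the takeWhile count
lemma climbPref_shift (ps : List (Int × Int)) : ∀ (t s : Int),
    ((climbPref t ps).takeWhile (· ≤ s)).length
      = ((climbPref 0 ps).takeWhile (· ≤ s - t)).length := by
  induction ps with
  | nil => intro t s; simp [climbPref]
  | cons hd tl ih =>
    intro t s
    obtain ⟨a, b⟩ := hd
    simp only [climbPref]
    set k : Int := |a - b| * (if a < b then 2 else 1) with hk
    rw [List.takeWhile_cons, List.takeWhile_cons]
    by_cases hc : t + k ≤ s
    · have hc0 : 0 + k ≤ s - t := by omega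
      simp only [hc, hc0, decide_true, if_true, List.length_cons]
      rw [ih (t + k) s, ih (0 + k) (s - t)]
      have : s - (t + k) = s - t - (0 + k) := by ring
      rw [this]
    · have hc0 : ¬ (k ≤ s - t) := by omega
      simp [hc, hc0]

-- A's loop counts the longest prefix of running costs that stays ≤ the initial stamina
lemma climbGoA_eq (ps : List (Int × Int)) : ∀ (s c : Int),
    climbGoA s c ps = c + (((climbPref 0 ps).takeWhile (· ≤ s)).length : Int) := by
  induction ps with
  | nil => intro s c; simp [climbGoA, climbPref]
  | cons hd tl ih =>
    intro s c
    obtain ⟨a, b⟩ := hd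
    have hfd : PySem.Int.floordiv (-(|a - b|)) 1 = -(|a - b|) := by
      simp [PySem.Int.floordiv]
    simp only [climbGoA, hfd]
    set k : Int := |a - b| * (if a < b then 2 else 1) with hk
    have hkk : - -(|a - b|) * ((if a - b < 0 then (1:Int) else 0) + 1) = k := by
      by_cases hab : a < b
      · have h1 : a - b < 0 := by omega
        rw [hk, if_pos hab, if_pos h1]; ring
      · have h1 : ¬ (a - b < 0) := by omega
        rw [hk, if_neg hab, if_neg h1]; ring
    rw [hkk]
    have hpref : climbPref 0 ((a, b) :: tl) = k :: climbPref k tl := by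
      simp only [climbPref, zero_add, ← hk]
    rw [hpref, List.takeWhile_cons]
    by_cases hs : s - k < 0
    · rw [if_pos hs]
      have hns : ¬ (k ≤ s) := by omega
      simp [hns]
    · rw [if_neg hs, ih (s - k) (c + 1)]
      have hks : k ≤ s := by omega
      have hsh := climbPref_shift tl k s
      simp only [hks, decide_true, if_true, List.length_cons]
      rw [hsh]
      push_cast
      ring

-- every element of climbPref t ps is ≥ t
lemma climbPref_lb (ps : List (Int × Int)) : ∀ (t : Int), ∀ x ∈ climbPref t ps, t ≤ x := by
  induction ps with
  | nil => intro t x hx; simp [climbPref] at hx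
  | cons hd tl ih =>
    intro t x hx
    obtain ⟨a, b⟩ := hd
    simp only [climbPref, List.mem_cons] at hx
    have hk : (0:Int) ≤ |a - b| * (if a < b then 2 else 1) := by
      have h0 := abs_nonneg (a - b)
      by_cases hab : a < b
      · rw [if_pos hab]; omega
      · rw [if_neg hab]; omega
    rcases hx with h | h
    · omega
    · have := ih _ _ h; omega

-- the prefix table is non-decreasing
lemma climbPref_mono (ps : List (Int × Int)) : ∀ (t : Int),
    (climbPref t ps).Pairwise (· ≤ ·) := by
  induction ps with
  | nil => intro t; simp [climbPref]
  | cons hd tl ih =>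
    intro t
    obtain ⟨a, b⟩ := hd
    simp only [climbPref]
    exact List.Pairwise.cons (fun y hy => climbPref_lb tl _ y hy) (ih _)

-- indices below the takeWhile length satisfy the predicate
lemma takeWhile_lt_getD (s : Int) : ∀ (p : List Int) (i : Nat),
    i < ((p.takeWhile (· ≤ s)).length) → p.getD i 0 ≤ s := by
  intro p
  induction p with
  | nil => intro i h; simp at h
  | cons x xs ih =>
    intro i h
    rw [List.takeWhile_cons] at h
    by_cases hx : x ≤ s
    · simp only [hx, decide_true, if_true, List.length_cons] at h
      cases i with
      | zero => simpa using hx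
      | succ j => exact ih j (by omega)
    · simp [hx] at h

-- indices at/after the takeWhile length fail the predicate (needs monotonicity)
lemma takeWhile_ge_getD (s : Int) : ∀ (p : List Int), p.Pairwise (· ≤ ·) →
    ∀ (i : Nat), ((p.takeWhile (· ≤ s)).length) ≤ i → i < p.length → s < p.getD i 0 := by
  intro p
  induction p with
  | nil => intro _ i _ h; simp at h
  | cons x xs ih =>
    intro hp i hge hlt
    have hp' := List.Pairwise.of_cons hp
    have hx_le : ∀ y ∈ xs, x ≤ y := fun y hy => List.rel_of_pairwise_cons hp hy
    rw [List.takeWhile_cons] at hge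
    by_cases hx : x ≤ s
    · simp only [hx, decide_true, if_true, List.length_cons] at hge
      cases i with
      | zero => omega
      | succ j =>
        exact ih hp' j (by omega) (by simpa using hlt)
    · cases i with
      | zero => simpa using (by omega : s < x)
      | succ j =>
        have hj : j < xs.length := by simpa using hlt
        have hmem : xs.getD j 0 ∈ xs := by
          rw [List.getD_eq_getElem _ _ hj]; exact List.getElem_mem hj
        have := hx_le _ hmem
        simpa using (by omega : s < xs.getD j 0)

-- the binary search lands exactly on the takeWhile length
lemma climbBisect_eq (p : List Int) (s : Int) (hp : p.Pairwise (· ≤ ·)) :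
    ∀ (n lo hi : Nat), hi - lo ≤ n → hi ≤ p.length →
      lo ≤ ((p.takeWhile (· ≤ s)).length) → ((p.takeWhile (· ≤ s)).length) ≤ hi →
      climbBisect p s lo hi = ((p.takeWhile (· ≤ s)).length) := by
  intro n
  induction n with
  | zero =>
    intro lo hi hfuel _ hlo hhi
    rw [climbBisect]
    have hnl : ¬ lo < hi := by omega
    simp only [hnl, dite_false]
    omega
  | succ m ih =>
    intro lo hi hfuel hhi hlo hhi'
    rw [climbBisect]
    by_cases hlh : lo < hi
    · simp only [hlh, dite_true]
      set mid := (lo + hi) / 2 with hmid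
      have hml : lo ≤ mid := by omega
      have hmh : mid < hi := by omega
      by_cases hc : s < p.getD mid 0
      · rw [if_pos hc]
        have hT : ((p.takeWhile (· ≤ s)).length) ≤ mid := by
          by_contra hcon
          have := takeWhile_lt_getD s p mid (by omega)
          omega
        exact ih lo mid (by omega) (by omega) hlo hT
      · rw [if_neg hc]
        have hT : mid + 1 ≤ ((p.takeWhile (· ≤ s)).length) := by
          by_contra hcon
          have := takeWhile_ge_getD s p hp mid (by omega) (by omega)
          omega
        exact ih (mid + 1) hi (by omega) hhi hT hhi'
    · simp only [hlh, dite_false]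
      omega

-- ===== VERDICT (by name: the statement is the Claim_ definition above) =====
theorem climb_spec : Claim_equal_climb := by
  intro stamina obstacles _
  unfold Spec_climb
  simp only [climb, climb_alt]
  set ps := obstacles.zip obstacles.tail with hps
  set p := climbPref 0 ps with hpdef
  have hT : ((p.takeWhile (· ≤ stamina)).length) ≤ p.length :=
    (List.takeWhile_sublist _).length_le
  rw [climbGoA_eq, climbBisect_eq p stamina (climbPref_mono ps 0) p.length 0 p.length
      (by omega) (le_refl _) (by omega) hT, ← hpdef]
  omega
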